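-- pv_equiv track=rewrite | github.com/ntozato/restaurant-orders | src/analyze_log.py | days_off
-- ===== SOURCE A (Python) =====
-- def days_off(data, client):
--     all_days = set()
--     client_request_days = set()
--
--     for item in data:
--         if item[2] not in all_days:
--             all_days.add(item[2])
--         if item[0] == client:
--             client_request_days.add(item[2])
--
--     return all_days.difference(client_request_days)
-- ===== SOURCE B (Python) =====
-- def days_off(data, client):
--     by_day = {}
--     for item in data:
--         by_day.setdefault(item[2], set()).add(item[0])
--     return {day for day, clients in by_day.items() if client not in clients}
-- ===== Notes on version B (the rewrite author's own statement) =====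
-- stated objective: alternative
-- what changed: Instead of maintaining two flat day-sets and taking their set difference, B groups the log once into a dict day -> set of requesting clients and returns the days whose client-set does not contain the client.
import Mathlib
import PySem

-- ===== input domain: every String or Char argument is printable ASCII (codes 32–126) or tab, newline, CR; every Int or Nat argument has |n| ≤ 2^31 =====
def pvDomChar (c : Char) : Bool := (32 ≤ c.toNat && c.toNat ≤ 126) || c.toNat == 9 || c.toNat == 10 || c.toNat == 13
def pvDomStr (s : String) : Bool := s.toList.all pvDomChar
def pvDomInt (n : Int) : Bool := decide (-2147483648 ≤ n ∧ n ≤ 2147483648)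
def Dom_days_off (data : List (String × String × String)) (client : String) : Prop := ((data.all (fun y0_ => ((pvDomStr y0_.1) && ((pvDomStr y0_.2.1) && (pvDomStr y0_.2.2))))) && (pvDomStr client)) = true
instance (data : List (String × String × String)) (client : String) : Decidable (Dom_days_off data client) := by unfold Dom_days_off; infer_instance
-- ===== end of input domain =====

-- B groups the log once into a dict day -> set of requesting clients and filters the dict's
-- entries, instead of A's two flat day-sets followed by a set difference; same cost, different shape.

-- ===== PORT A =====
def days_off (data : List (String × String × String)) (client : String) : List String :=
  let st := data.foldl
    (fun (st : PySem.Set String × PySem.Set String) item =>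
      let allDays := if PySem.Set.contains st.1 item.2.2 then st.1
                     else PySem.Set.add st.1 item.2.2
      let cliDays := if item.1 == client then PySem.Set.add st.2 item.2.2 else st.2
      (allDays, cliDays))
    (PySem.Set.empty, PySem.Set.empty)
  PySem.Set.diff st.1 st.2

-- ===== PORT B =====
def days_off_alt (data : List (String × String × String)) (client : String) : List String :=
  let byDay : PySem.Dict String (PySem.Set String) :=
    data.foldl
      (fun d item => d.modify item.2.2 PySem.Set.empty (fun s => PySem.Set.add s item.1))
      PySem.Dict.empty
  -- set comprehension over the dict's items: keys are distinct, so this list is a set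
  (byDay.items.filter (fun p => !(PySem.Set.contains p.2 client))).map (·.1)

-- ===== PRECONDITION & SPEC =====
def Spec_days_off (data : List (String × String × String)) (client : String) (out : List String) : Prop := out = days_off_alt data client
instance (data : List (String × String × String)) (client : String) (out : List String) : Decidable (Spec_days_off data client out) := by unfold Spec_days_off; infer_instance

-- ===== CLAIM (what is proved, stated in full; the proofs are below) =====
def Claim_equal_days_off : Prop := ∀ (data : List (String × String × String)) (client : String), Dom_days_off data client → Spec_days_off data client (days_off data client)

-- ===== LEMMAS AND PROOFS =====

-- A's pair-fold decomposes into two independent folds.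
theorem afold_fst (client : String) (l : List (String × String × String))
    (sa sc : PySem.Set String) :
    (l.foldl
      (fun (st : PySem.Set String × PySem.Set String) item =>
        let allDays := if PySem.Set.contains st.1 item.2.2 then st.1
                       else PySem.Set.add st.1 item.2.2
        let cliDays := if item.1 == client then PySem.Set.add st.2 item.2.2 else st.2
        (allDays, cliDays)) (sa, sc)).1
    = l.foldl (fun s item => PySem.Set.add s item.2.2) sa := by
  induction l generalizing sa sc with
  | nil => rfl
  | cons hd tl ih =>
    simp only [List.foldl_cons]
    rw [ih]
    congr 1
    simp only [PySem.Set.add]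
    split_ifs <;> rfl

theorem afold_snd (client : String) (l : List (String × String × String))
    (sa sc : PySem.Set String) :
    (l.foldl
      (fun (st : PySem.Set String × PySem.Set String) item =>
        let allDays := if PySem.Set.contains st.1 item.2.2 then st.1
                       else PySem.Set.add st.1 item.2.2
        let cliDays := if item.1 == client then PySem.Set.add st.2 item.2.2 else st.2
        (allDays, cliDays)) (sa, sc)).2
    = l.foldl (fun s item => if item.1 == client then PySem.Set.add s item.2.2 else s) sc := by
  induction l generalizing sa sc with
  | nil => rfl
  | cons hd tl ih => simp only [List.foldl_cons]; rw [ih]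

theorem beq_swap (a b : String) : (a == b) = decide (b = a) := by
  by_cases h : a = b
  · subst h; simp
  · simp [h, Ne.symm h]

theorem contains_add (s : PySem.Set String) (x y : String) :
    PySem.Set.contains (PySem.Set.add s x) y = (PySem.Set.contains s y || (x == y)) := by
  simp only [PySem.Set.contains, PySem.Set.add]
  by_cases h : List.contains s x = true
  · simp only [h, if_true]
    by_cases hxy : x = y
    · subst hxy; simp [List.contains_eq_mem] at h ⊢; simp [h]
    · have h1 : (x == y) = false := beq_false_of_ne hxy
      simp [h1]
  · simp only [h]
    simp [List.contains_eq_mem, beq_swap]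

-- membership of a day in A's client-day set
theorem contains_cfold (client day : String) (l : List (String × String × String))
    (sc : PySem.Set String) :
    PySem.Set.contains
      (l.foldl (fun s item => if item.1 == client then PySem.Set.add s item.2.2 else s) sc) day
    = (PySem.Set.contains sc day || l.any (fun item => item.1 == client && item.2.2 == day)) := by
  induction l generalizing sc with
  | nil => simp
  | cons hd tl ih =>
    simp only [List.foldl_cons, List.any_cons, ih]
    by_cases h : hd.1 = client
    · simp [h, Bool.or_assoc, beq_swap]
    · have h1 : (hd.1 == client) = false := beq_false_of_ne h
      simp [h1]

-- the per-day client set B accumulates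
theorem getD_bfold (l : List (String × String × String))
    (d : PySem.Dict String (PySem.Set String)) (day : String) :
    (l.foldl (fun d item => d.modify item.2.2 PySem.Set.empty
        (fun s => PySem.Set.add s item.1)) d).getD day PySem.Set.empty
    = (l.filter (fun item => item.2.2 == day)).foldl
        (fun s item => PySem.Set.add s item.1) (d.getD day PySem.Set.empty) := by
  induction l generalizing d with
  | nil => rfl
  | cons hd tl ih =>
    simp only [List.foldl_cons, List.filter_cons]
    rw [ih, PySem.Dict.getD_modify]
    by_cases h : day = hd.2.2
    · simp [h]
    · have hne : (hd.2.2 == day) = false := by simp; exact fun e => h e.symm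
      simp [h, hne]

theorem contains_addfold (c : String) (l : List (String × String × String))
    (s : PySem.Set String) :
    PySem.Set.contains (l.foldl (fun s item => PySem.Set.add s item.1) s) c
    = (PySem.Set.contains s c || l.any (fun item => item.1 == c)) := by
  induction l generalizing s with
  | nil => simp
  | cons hd tl ih =>
    simp only [List.foldl_cons, List.any_cons]
    rw [ih, contains_add, Bool.or_assoc]

-- ===== VERDICT (by name: the statement is the Claim_ definition above) =====
theorem days_off_spec : Claim_equal_days_off := by
  intro data client _
  unfold Spec_days_off days_off days_off_alt
  simp only []
  rw [afold_fst, afold_snd]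
  have hnd : (data.foldl (fun d item => d.modify item.2.2 PySem.Set.empty
      (fun s => PySem.Set.add s item.1)) PySem.Dict.empty).keys.Nodup :=
    PySem.Dict.nodup_keys_foldl_modify_key data (fun item => item.2.2) PySem.Set.empty
      (fun _ item s => PySem.Set.add s item.1) PySem.Dict.empty (by simp)
  rw [PySem.Dict.items_eq_map_keys _ hnd PySem.Set.empty, List.filter_map, List.map_map]
  simp only [Function.comp_def]
  have hkeys : (data.foldl (fun d item => d.modify item.2.2 PySem.Set.empty
      (fun s => PySem.Set.add s item.1)) PySem.Dict.empty).keys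
      = data.foldl (fun s item => PySem.Set.add s item.2.2) PySem.Set.empty := by
    rw [PySem.Dict.keys_foldl_modify_key data (fun item => item.2.2) PySem.Set.empty
      (fun _ item s => PySem.Set.add s item.1) PySem.Dict.empty]
    simp [PySem.Set.update, PySem.Dict.keys_empty, List.foldl_map]
  rw [hkeys]
  simp only [PySem.Set.diff]
  rw [List.map_id']
  apply List.filter_congr
  intro day _
  rw [contains_cfold, getD_bfold, contains_addfold]
  simp only [PySem.Dict.getD_empty, List.any_filter]
  simp only [PySem.Set.contains, PySem.Set.empty, List.contains_nil, Bool.false_or]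
  rw [List.any_congr (rfl : data = data)
    (fun a => Bool.and_comm (a.1 == client) (a.2.2 == day))]
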